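-- pv_equiv track=rewrite | github.com/joel-s/portfolio | Python/Distractions/bitmap-to-numbers.py | bitmapTextToNumbers
-- ===== SOURCE A (Python) =====
-- def textToNumber(text):
--     result = 0
--     for char in text:
--         result <<= 1
--         if char != " ":
--             result += 1
--     return result
--
-- def bitmapTextToNumbers(textArray):
--     numberArray = []
--     for line in textArray:
--         arrayLine = []
--         while line != "":
--             next16, line = line[0:16], line[16:]
--             if len(next16) < 16:
--                 next16 += " " * (16 - len(next16))
--             arrayLine.append(textToNumber(next16))
--         numberArray.append(arrayLine)
--     return numberArray
-- ===== SOURCE B (Python) =====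
-- def bitmapTextToNumbers(textArray):
--     numberArray = []
--     for line in textArray:
--         arrayLine = []
--         acc = 0
--         cnt = 0
--         for c in line:
--             acc = 2 * acc + (0 if c == " " else 1)
--             cnt += 1
--             if cnt == 16:
--                 arrayLine.append(acc)
--                 acc = 0
--                 cnt = 0
--         if cnt != 0:
--             arrayLine.append(acc * 2 ** (16 - cnt))
--         numberArray.append(arrayLine)
--     return numberArray
-- ===== Notes on version B (the rewrite author's own statement) =====
-- stated objective: simpler
-- what changed: Replaces the chunk-slicing while-loop plus the textToNumber helper with a single flat pass over each line's characters maintaining an accumulator and a bit counter, emitting a number every 16 characters and left-shifting the final short chunk.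
import Mathlib
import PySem

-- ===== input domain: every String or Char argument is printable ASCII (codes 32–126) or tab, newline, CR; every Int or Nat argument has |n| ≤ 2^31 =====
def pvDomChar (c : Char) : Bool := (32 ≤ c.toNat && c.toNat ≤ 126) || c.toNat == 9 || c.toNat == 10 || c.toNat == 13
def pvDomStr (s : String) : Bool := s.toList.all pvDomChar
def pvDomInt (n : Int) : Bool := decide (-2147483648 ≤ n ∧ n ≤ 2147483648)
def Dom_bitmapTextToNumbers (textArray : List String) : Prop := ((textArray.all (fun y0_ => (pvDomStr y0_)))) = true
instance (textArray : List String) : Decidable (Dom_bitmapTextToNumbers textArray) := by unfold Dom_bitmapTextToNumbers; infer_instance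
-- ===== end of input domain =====

-- B replaces the chunk-slice-then-convert nested loops with one flat accumulator pass per line (same cost, simpler decomposition).


-- ===== PORT A =====
-- textToNumber: fold over the characters, shift left, add 1 for non-space.
def textToNumber (text : List Char) : Int :=
  text.foldl (fun result char =>
    let result := result * 2
    if char ≠ ' ' then result + 1 else result) 0

-- the 'while line != ""' loop of A, on the code-point list of the line
def pvLineA (arrayLine : List Int) (line : List Char) : List Int :=
  if h : line = [] then arrayLine
  else
    let next16 := PySem.List.slice line (some 0) (some 16)
    let line' := PySem.List.slice line (some 16) none
    let next16 := if next16.length < 16 then next16 ++ List.replicate (16 - next16.length) ' ' else next16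
    pvLineA (arrayLine ++ [textToNumber next16]) line'
termination_by line.length
decreasing_by
  rw [PySem.List.slice_from line (by norm_num : (0:Int) ≤ (16:Int)), List.length_drop]
  have hp : 0 < line.length := List.length_pos_of_ne_nil h
  omega

def bitmapTextToNumbers (textArray : List String) : List (List Int) :=
  textArray.foldl (fun numberArray line => numberArray ++ [pvLineA [] line.toList]) []

-- ===== PORT B =====
-- one step of B's flat pass: acc·2 + bit, count, emit every 16 characters
def pvStepB (st : Int × Nat × List Int) (c : Char) : Int × Nat × List Int :=
  let acc := 2 * st.1 + (if c = ' ' then 0 else 1)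
  let cnt := st.2.1 + 1
  if cnt = 16 then (0, 0, st.2.2 ++ [acc]) else (acc, cnt, st.2.2)

def pvLineB (line : List Char) : List Int :=
  let st := line.foldl pvStepB (0, 0, [])
  if st.2.1 ≠ 0 then st.2.2 ++ [st.1 * 2 ^ (16 - st.2.1)] else st.2.2

def bitmapTextToNumbers_alt (textArray : List String) : List (List Int) :=
  textArray.map (fun line => pvLineB line.toList)

-- ===== PRECONDITION & SPEC =====
def Spec_bitmapTextToNumbers (textArray : List String) (out : List (List Int)) : Prop := out = bitmapTextToNumbers_alt textArray
instance (textArray : List String) (out : List (List Int)) : Decidable (Spec_bitmapTextToNumbers textArray out) := by unfold Spec_bitmapTextToNumbers; infer_instance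

-- ===== CLAIM (what is proved, stated in full; the proofs are below) =====
def Claim_equal_bitmapTextToNumbers : Prop := ∀ (textArray : List String), Dom_bitmapTextToNumbers textArray → Spec_bitmapTextToNumbers textArray (bitmapTextToNumbers textArray)

-- ===== LEMMAS AND PROOFS =====

-- numAcc a cs : B's accumulator update folded over cs, starting from a
def numAcc (a : Int) (cs : List Char) : Int :=
  cs.foldl (fun a c => 2 * a + (if c = ' ' then 0 else 1)) a

theorem numAcc_nil (a : Int) : numAcc a [] = a := rfl
theorem numAcc_cons (a : Int) (c : Char) (cs : List Char) :
    numAcc a (c :: cs) = numAcc (2 * a + (if c = ' ' then 0 else 1)) cs := rfl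

theorem textToNumber_eq (cs : List Char) : textToNumber cs = numAcc 0 cs := by
  have : ∀ (a : Int) (l : List Char),
      l.foldl (fun result char => let result := result * 2; if char ≠ ' ' then result + 1 else result) a
        = numAcc a l := by
    intro a l
    induction l generalizing a with
    | nil => rfl
    | cons c cs ih =>
      simp only [List.foldl, numAcc_cons]
      rw [ih]
      congr 1
      by_cases h : c = ' ' <;> simp [h] <;> ring_nf
  exact this 0 cs

theorem numAcc_append (a : Int) (xs ys : List Char) :
    numAcc a (xs ++ ys) = numAcc (numAcc a xs) ys := by
  simp [numAcc, List.foldl_append]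

theorem numAcc_replicate (a : Int) (n : Nat) :
    numAcc a (List.replicate n ' ') = a * 2 ^ n := by
  induction n generalizing a with
  | zero => simp [numAcc]
  | succ n ih =>
    have h0 : (if (' ' : Char) = ' ' then (0:Int) else 1) = 0 := if_pos rfl
    rw [List.replicate_succ, numAcc_cons, h0, add_zero, ih]
    ring

-- partial run: fewer than the remaining capacity, nothing is emitted
theorem foldB_partial (cs : List Char) (acc : Int) (cnt : Nat) (out : List Int)
    (h : cs.length + cnt < 16) :
    cs.foldl pvStepB (acc, cnt, out) = (numAcc acc cs, cnt + cs.length, out) := by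
  induction cs generalizing acc cnt with
  | nil => simp [numAcc]
  | cons c cs ih =>
    simp only [List.foldl, pvStepB]
    rw [if_neg (by simp at h; omega)]
    rw [ih _ _ (by simp at h ⊢; omega), numAcc_cons]
    simp; omega

-- full chunk: exactly k characters fill the counter from 16-k to 16 and emit
theorem foldB_chunk (k : Nat) (cs : List Char) (acc : Int) (out : List Int)
    (hk0 : 0 < k) (hk : k ≤ 16) (hlen : k ≤ cs.length) :
    cs.foldl pvStepB (acc, 16 - k, out)
      = (cs.drop k).foldl pvStepB (0, 0, out ++ [numAcc acc (cs.take k)]) := by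
  induction k generalizing cs acc out with
  | zero => omega
  | succ k ih =>
    cases cs with
    | nil => simp at hlen
    | cons c cs =>
      simp only [List.foldl, pvStepB]
      by_cases hk1 : k = 0
      · subst hk1
        rw [if_pos (by omega)]
        simp [numAcc_cons, numAcc_nil]
      · rw [if_neg (by omega)]
        have h1 : 16 - (k + 1) + 1 = 16 - k := by omega
        rw [show ((2 * acc + (if c = ' ' then 0 else 1), 16 - (k+1) + 1, out) :
              Int × Nat × List Int)
            = (2 * acc + (if c = ' ' then 0 else 1), 16 - k, out) by rw [h1]]
        rw [ih cs _ out (by omega) (by omega) (by simp at hlen; omega)]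
        simp [numAcc_cons]

-- the "flush" of B's final state
def pvFinishB (st : Int × Nat × List Int) : List Int :=
  if st.2.1 ≠ 0 then st.2.2 ++ [st.1 * 2 ^ (16 - st.2.1)] else st.2.2

theorem pvLineB_eq (cs : List Char) : pvLineB cs = pvFinishB (cs.foldl pvStepB (0, 0, [])) := rfl

theorem pvLineA_nil (out : List Int) : pvLineA out [] = out := by
  rw [pvLineA.eq_def]
  simp

theorem slice_take16 (line : List Char) :
    PySem.List.slice line (some 0) (some 16) = line.take 16 := by
  rw [PySem.List.slice_zero_start, PySem.List.slice_to line (by norm_num : (0:Int) ≤ (16:Int))]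
  rw [show Int.toNat 16 = 16 from rfl]

theorem slice_drop16 (line : List Char) :
    PySem.List.slice line (some 16) none = line.drop 16 := by
  rw [PySem.List.slice_from line (by norm_num : (0:Int) ≤ (16:Int))]
  rw [show Int.toNat 16 = 16 from rfl]

theorem pvLineA_cons (out : List Int) (line : List Char) (h : line ≠ []) :
    pvLineA out line =
      pvLineA (out ++ [textToNumber
          (if (line.take 16).length < 16
            then line.take 16 ++ List.replicate (16 - (line.take 16).length) ' '
            else line.take 16)]) (line.drop 16) := by
  rw [pvLineA.eq_def, dif_neg h]
  simp only [slice_take16, slice_drop16]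

-- per-line equivalence, strong induction on the line length
theorem line_eq (cs : List Char) (out : List Int) :
    pvFinishB (cs.foldl pvStepB (0, 0, out)) = pvLineA out cs := by
  induction hn : cs.length using Nat.strong_induction_on generalizing cs out with
  | _ n ih =>
  cases hcs : cs with
  | nil =>
    simp [pvFinishB, pvLineA_nil]
  | cons c rest =>
    subst hcs
    by_cases hlen : (c :: rest).length < 16
    · -- short line: one padded chunk
      rw [foldB_partial _ _ _ _ (by omega)]
      rw [pvLineA_cons _ _ (by simp)]
      have htake : (c :: rest).take 16 = c :: rest :=
        List.take_of_length_le (by omega)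
      have hdrop : (c :: rest).drop 16 = ([] : List Char) :=
        List.drop_of_length_le (by omega)
      rw [htake, hdrop, if_pos (by omega), pvLineA_nil]
      simp only [pvFinishB]
      rw [if_pos (by simp)]
      rw [textToNumber_eq, numAcc_append, numAcc_replicate]
      simp
    · -- full chunk of 16, then recurse on the rest
      have h16 : (16:Nat) ≤ (c :: rest).length := by omega
      have hstep := foldB_chunk 16 (c :: rest) 0 out (by norm_num) (le_refl _) h16
      rw [show (16 - 16 : Nat) = 0 from rfl] at hstep
      rw [hstep]
      have hlt : ((c :: rest).drop 16).length < n := by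
        simp at hn ⊢
        omega
      rw [ih _ hlt _ _ rfl]
      conv_rhs => rw [pvLineA_cons out (c :: rest) (by simp)]
      have hfull : ¬ ((List.take 16 (c :: rest)).length < 16) := by
        have h16' := h16
        simp only [List.length_take, List.length_cons] at h16' ⊢
        omega
      rw [if_neg hfull]
      rw [textToNumber_eq]

theorem foldA_map (xs : List String) (acc : List (List Int)) :
    xs.foldl (fun numberArray line => numberArray ++ [pvLineA [] line.toList]) acc
      = acc ++ xs.map (fun line => pvLineB line.toList) := by
  induction xs generalizing acc with
  | nil => simp
  | cons x xs ih =>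
    simp only [List.foldl, List.map]
    rw [ih]
    rw [pvLineB_eq, line_eq]
    simp

-- ===== VERDICT (by name: the statement is the Claim_ definition above) =====
theorem bitmapTextToNumbers_spec : Claim_equal_bitmapTextToNumbers := by
  intro textArray _
  unfold Spec_bitmapTextToNumbers bitmapTextToNumbers bitmapTextToNumbers_alt
  rw [foldA_map]
  simp
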